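-- pv_equiv track=rewrite | github.com/hong0002/Baekjoon | 기타/CD.py | count_common
-- ===== SOURCE A (Python) =====
-- def count_common(a, b):
--     """두 정렬된 리스트 a, b에서 공통 원소의 개수를 두 포인터로 세기"""
--     i = j = cnt = 0
--     n, m = len(a), len(b)
--     while i < n and j < m:
--         if a[i] == b[j]:
--             cnt += 1
--             i += 1
--             j += 1
--         elif a[i] < b[j]:
--             i += 1
--         else:
--             j += 1
--     return cnt
-- ===== SOURCE B (Python) =====
-- def count_common(a, b):
--     """Count common elements of two sorted lists by galloping over runs of equal values."""
--     i = j = cnt = 0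
--     n, m = len(a), len(b)
--     while i < n and j < m:
--         if a[i] < b[j]:
--             i += 1
--         elif b[j] < a[i]:
--             j += 1
--         else:
--             v = a[i]
--             ra = i
--             while ra < n and a[ra] == v:
--                 ra += 1
--             rb = j
--             while rb < m and b[rb] == v:
--                 rb += 1
--             k = min(ra - i, rb - j)
--             cnt += k
--             i += k
--             j += k
--     return cnt
-- ===== Notes on version B (the rewrite author's own statement) =====
-- stated objective: alternative
-- what changed: Replaces the element-at-a-time two-pointer pairing by run-length block matching: on a head match it scans the run of equal values in each list once and advances both pointers by the minimum run length in one step, adding that whole block to the count.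
import Mathlib
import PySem

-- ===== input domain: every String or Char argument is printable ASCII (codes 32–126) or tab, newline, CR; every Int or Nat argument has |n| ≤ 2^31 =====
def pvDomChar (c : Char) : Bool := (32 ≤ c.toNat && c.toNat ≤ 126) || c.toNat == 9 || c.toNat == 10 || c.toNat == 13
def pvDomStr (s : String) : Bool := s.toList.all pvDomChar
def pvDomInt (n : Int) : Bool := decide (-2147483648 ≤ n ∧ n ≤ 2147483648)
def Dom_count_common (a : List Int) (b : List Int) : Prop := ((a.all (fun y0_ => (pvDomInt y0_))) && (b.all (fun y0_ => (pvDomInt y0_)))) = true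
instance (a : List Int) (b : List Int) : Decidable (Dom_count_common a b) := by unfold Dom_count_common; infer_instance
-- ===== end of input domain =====

-- B replaces A's element-at-a-time two-pointer pairing by run-length block matching (scan each run
-- of equal values once and advance both pointers by the minimum run length); same count on every input.


-- ===== PORT A =====
-- the while loop: indices i, j, counter cnt (fuel only makes the recursion structural;
-- a.length + b.length bounds the number of iterations, so the fuel never runs out)
def ccLoopA (a b : List Int) : Nat → Nat → Nat → Int → Int
  | 0, _, _, cnt => cnt
  | fuel + 1, i, j, cnt =>
    if h : i < a.length ∧ j < b.length then
      if a[i] = b[j] then ccLoopA a b fuel (i + 1) (j + 1) (cnt + 1)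
      else if a[i] < b[j] then ccLoopA a b fuel (i + 1) j cnt
      else ccLoopA a b fuel i (j + 1) cnt
    else cnt

def count_common (a : List Int) (b : List Int) : Int :=
  ccLoopA a b (a.length + b.length) 0 0 0

-- ===== PORT B =====
-- the inner run scan 'while r < len(xs) and xs[r] == v: r += 1' (fuel = xs.length suffices)
def runEnd (xs : List Int) (v : Int) : Nat → Nat → Nat
  | 0, r => r
  | fuel + 1, r =>
    if h : r < xs.length then
      if xs[r] = v then runEnd xs v fuel (r + 1) else r
    else r

-- the outer while loop of B: on a head match, advance both pointers by the minimum run length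
def ccLoopB (a b : List Int) : Nat → Nat → Nat → Int → Int
  | 0, _, _, cnt => cnt
  | fuel + 1, i, j, cnt =>
    if h : i < a.length ∧ j < b.length then
      if a[i] < b[j] then ccLoopB a b fuel (i + 1) j cnt
      else if b[j] < a[i] then ccLoopB a b fuel i (j + 1) cnt
      else
        let v := a[i]
        let ra := runEnd a v a.length i
        let rb := runEnd b v b.length j
        let k := min (ra - i) (rb - j)
        ccLoopB a b fuel (i + k) (j + k) (cnt + (k : Int))
    else cnt

def count_common_alt (a : List Int) (b : List Int) : Int :=
  ccLoopB a b (a.length + b.length) 0 0 0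

-- ===== PRECONDITION & SPEC =====
def Spec_count_common (a : List Int) (b : List Int) (out : Int) : Prop := out = count_common_alt a b
instance (a : List Int) (b : List Int) (out : Int) : Decidable (Spec_count_common a b out) := by
  unfold Spec_count_common; infer_instance

-- ===== CLAIM (what is proved, stated in full; the proofs are below) =====
def Claim_equal_count_common : Prop := ∀ (a : List Int) (b : List Int), Dom_count_common a b → Spec_count_common a b (count_common a b)

-- ===== LEMMAS AND PROOFS =====

-- the common reference: a structural merge count over the two list suffixes
def mergeCount : List Int → List Int → Int
  | [], _ => 0
  | _ :: _, [] => 0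
  | x :: xs, y :: ys =>
    if x = y then 1 + mergeCount xs ys
    else if x < y then mergeCount xs (y :: ys)
    else mergeCount (x :: xs) ys

lemma ccLoopA_eq_mergeCount (a b : List Int) (fuel : Nat) :
    ∀ (i j : Nat) (cnt : Int), (a.length - i) + (b.length - j) ≤ fuel →
      ccLoopA a b fuel i j cnt = cnt + mergeCount (a.drop i) (b.drop j) := by
  induction fuel with
  | zero =>
    intro i j cnt hf
    have hi : a.length ≤ i := by omega
    rw [ccLoopA, List.drop_eq_nil_of_le hi, mergeCount]
    ring
  | succ fuel ih =>
    intro i j cnt hf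
    rw [ccLoopA]
    by_cases h : i < a.length ∧ j < b.length
    · rw [dif_pos h]
      by_cases heq : a[i] = b[j]
      · rw [if_pos heq, ih (i + 1) (j + 1) (cnt + 1) (by omega),
          List.drop_eq_getElem_cons h.1, List.drop_eq_getElem_cons h.2, mergeCount, if_pos heq]
        ring
      · by_cases hlt : a[i] < b[j]
        · rw [if_neg heq, if_pos hlt, ih (i + 1) j cnt (by omega),
            List.drop_eq_getElem_cons h.1, List.drop_eq_getElem_cons h.2, mergeCount,
            if_neg heq, if_pos hlt]
        · rw [if_neg heq, if_neg hlt, ih i (j + 1) cnt (by omega),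
            List.drop_eq_getElem_cons h.1, List.drop_eq_getElem_cons h.2, mergeCount,
            if_neg heq, if_neg hlt]
    · rw [dif_neg h]
      rcases Nat.lt_or_ge i a.length with hi | hi
      · have hj : b.length ≤ j := by omega
        rw [List.drop_eq_nil_of_le hj, List.drop_eq_getElem_cons hi, mergeCount]
        ring
      · rw [List.drop_eq_nil_of_le hi, mergeCount]
        ring

lemma runEnd_ge (xs : List Int) (v : Int) (fuel : Nat) :
    ∀ r, r ≤ runEnd xs v fuel r := by
  induction fuel with
  | zero => intro r; rw [runEnd]
  | succ fuel ih =>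
    intro r
    rw [runEnd]
    split_ifs with h hv
    · exact le_trans (by omega) (ih (r + 1))
    · exact le_refl r
    · exact le_refl r

lemma runEnd_val (xs : List Int) (v : Int) (fuel : Nat) :
    ∀ r q, r ≤ q → q < runEnd xs v fuel r → ∃ h : q < xs.length, xs[q] = v := by
  induction fuel with
  | zero => intro r q hrq hq; rw [runEnd] at hq; omega
  | succ fuel ih =>
    intro r q hrq hq
    rw [runEnd] at hq
    split_ifs at hq with h hv
    · rcases Nat.eq_or_lt_of_le hrq with rfl | hlt
      · exact ⟨h, hv⟩
      · exact ih (r + 1) q hlt hq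
    · omega
    · omega

lemma runEnd_gt (xs : List Int) (v : Int) (fuel : Nat) (r : Nat)
    (hf : 1 ≤ fuel) (hr : r < xs.length) (hv : xs[r] = v) :
    r < runEnd xs v fuel r := by
  obtain ⟨fuel', rfl⟩ : ∃ f', fuel = f' + 1 := ⟨fuel - 1, by omega⟩
  rw [runEnd, dif_pos hr, if_pos hv]
  exact lt_of_lt_of_le (by omega) (runEnd_ge xs v fuel' (r + 1))

-- a suffix whose first k positions all hold v splits as replicate k v ++ the later suffix
lemma drop_eq_replicate_append (xs : List Int) (v : Int) :
    ∀ (k i : Nat), (∀ q, q < k → ∃ h : i + q < xs.length, xs[i + q] = v) →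
      xs.drop i = List.replicate k v ++ xs.drop (i + k) := by
  intro k
  induction k with
  | zero => intro i _; simp
  | succ k ih =>
    intro i hq
    obtain ⟨h0, hv0⟩ := hq 0 (by omega)
    have h0' : i < xs.length := by omega
    have hv0' : xs[i] = v := by simpa using hv0
    have htail : ∀ q, q < k → ∃ h : (i + 1) + q < xs.length, xs[(i + 1) + q] = v := by
      intro q hqk
      obtain ⟨h1, hv1⟩ := hq (q + 1) (by omega)
      exact ⟨by omega, by simpa [show i + (q + 1) = (i + 1) + q by omega] using hv1⟩
    rw [List.drop_eq_getElem_cons h0', hv0', ih (i + 1) htail,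
      show (i + 1) + k = i + (k + 1) by omega, List.replicate_succ]
    simp

-- pairing off a common prefix of k equal values contributes exactly k to the merge count
lemma mergeCount_replicate (v : Int) :
    ∀ (k : Nat) (s t : List Int),
      mergeCount (List.replicate k v ++ s) (List.replicate k v ++ t) = (k : Int) + mergeCount s t := by
  intro k
  induction k with
  | zero => intro s t; simp
  | succ k ih =>
    intro s t
    rw [List.replicate_succ, List.cons_append, List.cons_append, mergeCount, if_pos rfl, ih]
    push_cast
    ring

lemma ccLoopB_eq_mergeCount (a b : List Int) (fuel : Nat) :
    ∀ (i j : Nat) (cnt : Int), (a.length - i) + (b.length - j) ≤ fuel →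
      ccLoopB a b fuel i j cnt = cnt + mergeCount (a.drop i) (b.drop j) := by
  induction fuel with
  | zero =>
    intro i j cnt hf
    have hi : a.length ≤ i := by omega
    rw [ccLoopB, List.drop_eq_nil_of_le hi, mergeCount]
    ring
  | succ fuel ih =>
    intro i j cnt hf
    rw [ccLoopB]
    by_cases h : i < a.length ∧ j < b.length
    · rw [dif_pos h]
      by_cases hab : a[i] < b[j]
      · rw [if_pos hab, ih (i + 1) j cnt (by omega),
          List.drop_eq_getElem_cons h.1, List.drop_eq_getElem_cons h.2, mergeCount,
          if_neg (by omega), if_pos hab]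
      · by_cases hba : b[j] < a[i]
        · rw [if_neg hab, if_pos hba, ih i (j + 1) cnt (by omega),
            List.drop_eq_getElem_cons h.1, List.drop_eq_getElem_cons h.2, mergeCount,
            if_neg (by omega), if_neg (by omega)]
        · have heq : a[i] = b[j] := by omega
          rw [if_neg hab, if_neg hba]
          set v := a[i] with hv
          set ra := runEnd a v a.length i with hra
          set rb := runEnd b v b.length j with hrb
          set k := min (ra - i) (rb - j) with hk
          have hka : ∀ q, q < k → ∃ hq : i + q < a.length, a[i + q] = v := by
            intro q hqk
            exact runEnd_val a v a.length i (i + q) (by omega) (by omega)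
          have hkb : ∀ q, q < k → ∃ hq : j + q < b.length, b[j + q] = v := by
            intro q hqk
            exact runEnd_val b v b.length j (j + q) (by omega) (by omega)
          have hia : i < ra := runEnd_gt a v a.length i (by omega) h.1 rfl
          have hjb : j < rb := runEnd_gt b v b.length j (by omega) h.2 heq.symm
          have hk1 : 1 ≤ k := by omega
          rw [ih (i + k) (j + k) (cnt + (k : Int)) (by omega),
            drop_eq_replicate_append a v k i hka, drop_eq_replicate_append b v k j hkb,
            mergeCount_replicate]
          ring
    · rw [dif_neg h]
      rcases Nat.lt_or_ge i a.length with hi | hi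
      · have hj : b.length ≤ j := by omega
        rw [List.drop_eq_nil_of_le hj, List.drop_eq_getElem_cons hi, mergeCount]
        ring
      · rw [List.drop_eq_nil_of_le hi, mergeCount]
        ring

-- ===== VERDICT (by name: the statement is the Claim_ definition above) =====
theorem count_common_spec : Claim_equal_count_common := by
  intro a b _
  unfold Spec_count_common count_common count_common_alt
  rw [ccLoopA_eq_mergeCount a b (a.length + b.length) 0 0 0 (by omega),
    ccLoopB_eq_mergeCount a b (a.length + b.length) 0 0 0 (by omega)]
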